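-- pv_equiv track=rewrite | github.com/kri-shah/LeetCode | CountPrimeSubarr.py | primeSubarray
-- ===== SOURCE A (Python) =====
-- from collections import deque
-- from typing import List
--
-- def primeSubarray(nums: List[int], k: int) -> int:
--     def is_prime(n: int) -> bool:
--         if n <= 1: return False
--         if n <= 3: return True
--         if n % 2 == 0 or n % 3 == 0: return False
--         i = 5
--         while i * i <= n:
--             if n % i == 0 or n % (i + 2) == 0:
--                 return False
--             i += 6
--         return True
--
--     max_q = deque()
--     min_q = deque()
--     primes = deque()
--
--     res = 0
--     l = 0
--
--     for r, val in enumerate(nums):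
--         if is_prime(val):
--             while max_q and nums[max_q[-1]] <= val:
--                 max_q.pop()
--             max_q.append(r)
--
--             while min_q and nums[min_q[-1]] >= val:
--                 min_q.pop()
--             min_q.append(r)
--
--             primes.append(r)
--
--         while primes and nums[max_q[0]] - nums[min_q[0]] > k:
--             if max_q and max_q[0] == l:
--                 max_q.popleft()
--             if min_q and min_q[0] == l:
--                 min_q.popleft()
--             if primes and primes[0] == l:
--                 primes.popleft()
--             l += 1
--
--         if len(primes) >= 2:
--             second_last_prime = primes[-2]
--             res += (second_last_prime - l + 1)
--
--     return res
-- ===== SOURCE B (Python) =====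
-- def primeSubarray(nums, k):
--     def is_prime(n):
--         if n <= 1: return False
--         if n <= 3: return True
--         if n % 2 == 0 or n % 3 == 0: return False
--         i = 5
--         while i * i <= n:
--             if n % i == 0 or n % (i + 2) == 0:
--                 return False
--             i += 6
--         return True
--
--     n = len(nums)
--     res = 0
--     for i in range(n):
--         cnt = 0
--         mn = None
--         mx = None
--         for j in range(i, n):
--             v = nums[j]
--             if is_prime(v):
--                 cnt += 1
--                 mn = v if mn is None or v < mn else mn
--                 mx = v if mx is None or v > mx else mx
--             if cnt >= 2 and mx - mn <= k:
--                 res += 1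
--     return res
-- ===== Notes on version B (the rewrite author's own statement) =====
-- stated objective: simpler
-- what changed: Replaces the three-monotonic-deque sliding window with a direct double loop that, for each left index, sweeps right while maintaining the count, min and max of prime values seen.
import Mathlib
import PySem

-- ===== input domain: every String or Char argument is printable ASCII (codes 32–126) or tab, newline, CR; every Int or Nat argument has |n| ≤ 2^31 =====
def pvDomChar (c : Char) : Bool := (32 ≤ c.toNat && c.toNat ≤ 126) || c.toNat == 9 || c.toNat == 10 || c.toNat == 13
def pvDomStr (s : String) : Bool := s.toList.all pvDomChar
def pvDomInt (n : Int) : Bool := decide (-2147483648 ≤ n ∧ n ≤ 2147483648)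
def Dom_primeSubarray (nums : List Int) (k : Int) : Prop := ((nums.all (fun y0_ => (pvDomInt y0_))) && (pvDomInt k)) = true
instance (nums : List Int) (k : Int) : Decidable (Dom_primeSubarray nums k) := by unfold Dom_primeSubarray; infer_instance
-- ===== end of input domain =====

-- B replaces A's three-monotonic-deque sliding window by a plain double loop (per left index, a sweep
-- maintaining count/min/max of prime values); simpler, not faster.

-- Python is_prime trial-division loop (identical helper in A and B)
def isPrimeLoop (n : Int) (i : Int) : Bool :=
  if _h : i * i ≤ n then
    if n % i == 0 || n % (i + 2) == 0 then false else isPrimeLoop n (i + 6)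
  else true
termination_by (n + 7 - i).toNat
decreasing_by
  have hin : i ≤ n := by nlinarith [mul_self_nonneg i]
  omega

def isPrime (n : Int) : Bool :=
  if n ≤ 1 then false
  else if n ≤ 3 then true
  else if n % 2 == 0 || n % 3 == 0 then false
  else isPrimeLoop n 5

-- nums[i]: every access in both programs is at an in-range index
def pyGetI (nums : List Int) (i : Nat) : Int := nums.getD i 0

-- ===== PORT A =====
-- while max_q and nums[max_q[-1]] <= val: max_q.pop()
def popMaxBack (nums : List Int) (q : List Nat) (val : Int) : List Nat :=
  match h : q.getLast? with
  | some j => if pyGetI nums j ≤ val then popMaxBack nums q.dropLast val else q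
  | none => q
termination_by q.length
decreasing_by
  have hq : q ≠ [] := by intro hq; simp [hq] at h
  have := List.length_pos_iff.mpr hq
  simp [List.length_dropLast]
  omega

-- while min_q and nums[min_q[-1]] >= val: min_q.pop()
def popMinBack (nums : List Int) (q : List Nat) (val : Int) : List Nat :=
  match h : q.getLast? with
  | some j => if val ≤ pyGetI nums j then popMinBack nums q.dropLast val else q
  | none => q
termination_by q.length
decreasing_by
  have hq : q ≠ [] := by intro hq; simp [hq] at h
  have := List.length_pos_iff.mpr hq
  simp [List.length_dropLast]
  omega

-- while primes and nums[max_q[0]] - nums[min_q[0]] > k: …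
-- (fuel merely totalizes the loop: on a real run l never exceeds len(nums), so fuel len(nums)+1 is never exhausted)
def shrinkLoop (nums : List Int) (k : Int) (fuel : Nat)
    (max_q min_q primes : List Nat) (l : Nat) :
    List Nat × List Nat × List Nat × Nat :=
  match fuel with
  | 0 => (max_q, min_q, primes, l)
  | fuel + 1 =>
    if primes ≠ [] ∧ pyGetI nums (max_q.headD 0) - pyGetI nums (min_q.headD 0) > k then
      let max_q' := if max_q ≠ [] ∧ max_q.headD 0 = l then max_q.tail else max_q
      let min_q' := if min_q ≠ [] ∧ min_q.headD 0 = l then min_q.tail else min_q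
      let primes' := if primes ≠ [] ∧ primes.headD 0 = l then primes.tail else primes
      shrinkLoop nums k fuel max_q' min_q' primes' (l + 1)
    else (max_q, min_q, primes, l)

-- body of `for r, val in enumerate(nums)`
def stepA (nums : List Int) (k : Int)
    (st : List Nat × List Nat × List Nat × Int × Nat) (r : Nat) :
    List Nat × List Nat × List Nat × Int × Nat :=
  let val := pyGetI nums r
  let mq := if isPrime val then popMaxBack nums st.1 val ++ [r] else st.1
  let nq := if isPrime val then popMinBack nums st.2.1 val ++ [r] else st.2.1
  let pq := if isPrime val then st.2.2.1 ++ [r] else st.2.2.1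
  let s := shrinkLoop nums k (nums.length + 1) mq nq pq st.2.2.2.2
  let res := if 2 ≤ s.2.2.1.length
    then st.2.2.2.1 + ((s.2.2.1.getD (s.2.2.1.length - 2) 0 : Int) - (s.2.2.2 : Int) + 1)
    else st.2.2.2.1
  (s.1, s.2.1, s.2.2.1, res, s.2.2.2)

def primeSubarray (nums : List Int) (k : Int) : Int :=
  ((List.range nums.length).foldl (stepA nums k) ([], [], [], 0, 0)).2.2.2.1

-- ===== PORT B =====
-- body of B's inner `for j in range(i, n)` loop
def stepB (k : Int) (st : Int × Option Int × Option Int × Int) (v : Int) :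
    Int × Option Int × Option Int × Int :=
  let cnt := if isPrime v then st.1 + 1 else st.1
  let mn := if isPrime v then
      some (match st.2.1 with | none => v | some m => if v < m then v else m)
    else st.2.1
  let mx := if isPrime v then
      some (match st.2.2.1 with | none => v | some m => if m < v then v else m)
    else st.2.2.1
  let res := if 2 ≤ cnt ∧ mx.getD 0 - mn.getD 0 ≤ k then st.2.2.2 + 1 else st.2.2.2
  (cnt, mn, mx, res)

def primeSubarray_alt (nums : List Int) (k : Int) : Int :=
  (List.range nums.length).foldl
    (fun res i => res + ((nums.drop i).foldl (stepB k) (0, none, none, 0)).2.2.2) 0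

-- ===== PRECONDITION & SPEC =====
def Spec_primeSubarray (nums : List Int) (k : Int) (out : Int) : Prop := out = primeSubarray_alt nums k
instance (nums : List Int) (k : Int) (out : Int) : Decidable (Spec_primeSubarray nums k out) := by unfold Spec_primeSubarray; infer_instance

-- ===== CLAIM (what is proved, stated in full; the proofs are below) =====
def Claim_equal_primeSubarray : Prop := ∀ (nums : List Int) (k : Int), Dom_primeSubarray nums k → Spec_primeSubarray nums k (primeSubarray nums k)

-- ===== LEMMAS AND PROOFS =====

-- indices of primes in the window [l, j)
def pidx (nums : List Int) (l j : Nat) : List Nat :=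
  (List.range j).filter (fun t => decide (l ≤ t) && isPrime (pyGetI nums t))

-- prime values in the window [l, j)
def vals (nums : List Int) (l j : Nat) : List Int := (pidx nums l j).map (pyGetI nums)

-- running min / max exactly as B maintains them
def omin (o : Option Int) (v : Int) : Option Int :=
  some (match o with | none => v | some m => if v < m then v else m)
def omax (o : Option Int) (v : Int) : Option Int :=
  some (match o with | none => v | some m => if m < v then v else m)
def mymin (xs : List Int) : Option Int := xs.foldl omin none
def mymax (xs : List Int) : Option Int := xs.foldl omax none

-- window [l, j) is acceptable: no primes, or prime max - prime min ≤ k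
abbrev okb (nums : List Int) (k : Int) (l j : Nat) : Prop :=
  pidx nums l j = [] ∨ (mymax (vals nums l j)).getD 0 - (mymin (vals nums l j)).getD 0 ≤ k

-- the subarray nums[i..j] is counted: ≥ 2 primes and prime max - prime min ≤ k
abbrev goodb (nums : List Int) (k : Int) (i j : Nat) : Prop :=
  2 ≤ (pidx nums i (j+1)).length ∧
    (mymax (vals nums i (j+1))).getD 0 - (mymin (vals nums i (j+1))).getD 0 ≤ k

def gcount (nums : List Int) (k : Int) (j : Nat) : Nat :=
  (List.range nums.length).countP (fun i => decide (goodb nums k i j))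

-- i stays in the max-queue iff every later prime in the window is strictly smaller
def keepMax (nums : List Int) (w : List Nat) (i : Nat) : Bool :=
  w.all (fun i' => decide (i < i' → pyGetI nums i' < pyGetI nums i))
def keepMin (nums : List Int) (w : List Nat) (i : Nat) : Bool :=
  w.all (fun i' => decide (i < i' → pyGetI nums i < pyGetI nums i'))

def rmax (nums : List Int) (l j : Nat) : List Nat :=
  (pidx nums l j).filter (keepMax nums (pidx nums l j))
def rmin (nums : List Int) (l j : Nat) : List Nat :=
  (pidx nums l j).filter (keepMin nums (pidx nums l j))

-- ---- pidx basics ----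
lemma pidx_mem (nums : List Int) (l j t : Nat) :
    t ∈ pidx nums l j ↔ t < j ∧ l ≤ t ∧ isPrime (pyGetI nums t) = true := by
  simp [pidx, List.mem_filter, List.mem_range, and_assoc]

lemma pidx_sorted (nums : List Int) (l j : Nat) : (pidx nums l j).Pairwise (· < ·) := by
  have h : (pidx nums l j).Sublist (List.range j) := List.filter_sublist
  exact List.pairwise_lt_range.sublist h

lemma pidx_succ (nums : List Int) (l j : Nat) :
    pidx nums l j ++ (if l ≤ j ∧ isPrime (pyGetI nums j) = true then [j] else [])
      = pidx nums l (j+1) := by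
  simp only [pidx, List.range_succ, List.filter_append]
  congr 1
  by_cases h : l ≤ j ∧ isPrime (pyGetI nums j) = true
  · simp [h.1, h.2]
  · rcases not_and_or.mp h with h1 | h1 <;> simp [h1]

lemma pidx_shift (nums : List Int) (l i j : Nat) (h : l ≤ i) :
    pidx nums i j = (pidx nums l j).filter (fun t => decide (i ≤ t)) := by
  simp only [pidx, List.filter_filter]
  apply List.filter_congr
  intro t _
  by_cases hi : i ≤ t
  · simp [hi, le_trans h hi]
  · simp [hi]

lemma pidx_succ_left (nums : List Int) (l j : Nat) :
    pidx nums (l+1) j = (pidx nums l j).filter (fun t => decide (t ≠ l)) := by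
  simp only [pidx, List.filter_filter]
  apply List.filter_congr
  intro t _
  by_cases h1 : l + 1 ≤ t
  · have : l ≤ t := by omega
    have : t ≠ l := by omega
    simp [h1, *]
  · by_cases h2 : l ≤ t
    · have : t = l := by omega
      simp [h1, this]
    · simp [h1, h2]

-- sorted list with all elements ≥ l: removing l removes (at most) the head
lemma filter_ne_head (l : Nat) (xs : List Nat) (hs : xs.Pairwise (· < ·))
    (hge : ∀ t ∈ xs, l ≤ t) :
    xs.filter (fun t => decide (t ≠ l)) = if xs.head? = some l then xs.tail else xs := by
  cases xs with
  | nil => simp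
  | cons a xs =>
    have htail : xs.filter (fun t => decide (t ≠ l)) = xs ∨ ∀ t ∈ xs, t ≠ l → True := Or.inr (by intros; trivial)
    by_cases ha : a = l
    · subst ha
      simp only [List.head?_cons, if_pos rfl, List.tail_cons, List.filter_cons]
      have : ∀ t ∈ xs, t ≠ a := by
        intro t ht h'
        have := (List.pairwise_cons.mp hs).1 t ht
        omega
      simp only [decide_eq_true_eq, ne_eq, not_true_eq_false, decide_false]
      simp only [Bool.false_eq_true, if_false]
      exact List.filter_eq_self.mpr (fun t ht => by simp [this t ht])
    · have hne : (List.head? (a :: xs) = some l) = False := by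
        simp [ha]
      rw [if_neg (by simp [ha])]
      apply List.filter_eq_self.mpr
      intro t ht
      rcases List.mem_cons.mp ht with rfl | ht'
      · simp [ha]
      · have hla := hge a (by simp)
        have := (List.pairwise_cons.mp hs).1 t ht'
        simp only [decide_eq_true_eq]
        omega

-- ---- mymax / mymin ----
lemma mymax_append (xs : List Int) (v : Int) : mymax (xs ++ [v]) = omax (mymax xs) v := by
  simp [mymax, List.foldl_append]
lemma mymin_append (xs : List Int) (v : Int) : mymin (xs ++ [v]) = omin (mymin xs) v := by
  simp [mymin, List.foldl_append]

lemma mymax_spec (xs : List Int) (m : Int) (h : mymax xs = some m) :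
    m ∈ xs ∧ ∀ v ∈ xs, v ≤ m := by
  induction xs using List.reverseRecOn generalizing m with
  | nil => simp [mymax] at h
  | append_singleton ys y ih =>
    rw [mymax_append] at h
    cases hys : mymax ys with
    | none =>
      rw [hys] at h
      simp [omax] at h
      subst h
      constructor
      · simp
      · intro v hv
        rcases List.mem_append.mp hv with hv | hv
        · cases hys' : ys with
          | nil => simp [hys'] at hv
          | cons a as =>
            exfalso
            rw [hys'] at hys
            simp [mymax] at hys
            have : ∀ (zs : List Int) (o : Option Int) (w : Int), zs.foldl omax (omax o w) ≠ none := by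
              intro zs
              induction zs with
              | nil => intro o w; simp [omax]
              | cons z zs ihz => intro o w; simp only [List.foldl_cons]; exact ihz _ _
            exact this as none a hys
        · simp at hv; omega
    | some m0 =>
      rw [hys] at h
      simp only [omax, Option.some.injEq] at h
      obtain ⟨hm0, hall⟩ := ih m0 hys
      by_cases hc : m0 < y
      · rw [if_pos hc] at h
        subst h
        refine ⟨by simp, ?_⟩
        intro v hv
        rcases List.mem_append.mp hv with hv | hv
        · exact le_of_lt (lt_of_le_of_lt (hall v hv) hc)
        · simp at hv; omega
      · rw [if_neg hc] at h
        subst h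
        refine ⟨List.mem_append_left _ hm0, ?_⟩
        intro v hv
        rcases List.mem_append.mp hv with hv | hv
        · exact hall v hv
        · simp at hv; omega

lemma mymin_spec (xs : List Int) (m : Int) (h : mymin xs = some m) :
    m ∈ xs ∧ ∀ v ∈ xs, m ≤ v := by
  induction xs using List.reverseRecOn generalizing m with
  | nil => simp [mymin] at h
  | append_singleton ys y ih =>
    rw [mymin_append] at h
    cases hys : mymin ys with
    | none =>
      rw [hys] at h
      simp [omin] at h
      subst h
      constructor
      · simp
      · intro v hv
        rcases List.mem_append.mp hv with hv | hv
        · cases hys' : ys with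
          | nil => simp [hys'] at hv
          | cons a as =>
            exfalso
            rw [hys'] at hys
            simp [mymin] at hys
            have : ∀ (zs : List Int) (o : Option Int) (w : Int), zs.foldl omin (omin o w) ≠ none := by
              intro zs
              induction zs with
              | nil => intro o w; simp [omin]
              | cons z zs ihz => intro o w; simp only [List.foldl_cons]; exact ihz _ _
            exact this as none a hys
        · simp at hv; omega
    | some m0 =>
      rw [hys] at h
      simp only [omin, Option.some.injEq] at h
      obtain ⟨hm0, hall⟩ := ih m0 hys
      by_cases hc : y < m0
      · rw [if_pos hc] at h
        subst h
        refine ⟨by simp, ?_⟩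
        intro v hv
        rcases List.mem_append.mp hv with hv | hv
        · exact le_of_lt (lt_of_lt_of_le hc (hall v hv))
        · simp at hv; omega
      · rw [if_neg hc] at h
        subst h
        refine ⟨List.mem_append_left _ hm0, ?_⟩
        intro v hv
        rcases List.mem_append.mp hv with hv | hv
        · exact hall v hv
        · simp at hv; omega

lemma mymax_ne_none (xs : List Int) (h : xs ≠ []) : ∃ m, mymax xs = some m := by
  induction xs using List.reverseRecOn with
  | nil => simp at h
  | append_singleton ys y _ => rw [mymax_append]; exact ⟨_, rfl⟩

lemma mymin_ne_none (xs : List Int) (h : xs ≠ []) : ∃ m, mymin xs = some m := by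
  induction xs using List.reverseRecOn with
  | nil => simp at h
  | append_singleton ys y _ => rw [mymin_append]; exact ⟨_, rfl⟩

lemma mymax_eq (xs : List Int) (m : Int) (hm : m ∈ xs) (hall : ∀ v ∈ xs, v ≤ m) :
    mymax xs = some m := by
  obtain ⟨m', hm'⟩ := mymax_ne_none xs (by rintro rfl; simp at hm)
  obtain ⟨hmem, hall'⟩ := mymax_spec xs m' hm'
  have h1 := hall m' hmem
  have h2 := hall' m hm
  rw [hm']
  congr 1
  omega

lemma mymin_eq (xs : List Int) (m : Int) (hm : m ∈ xs) (hall : ∀ v ∈ xs, m ≤ v) :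
    mymin xs = some m := by
  obtain ⟨m', hm'⟩ := mymin_ne_none xs (by rintro rfl; simp at hm)
  obtain ⟨hmem, hall'⟩ := mymin_spec xs m' hm'
  have h1 := hall m' hmem
  have h2 := hall' m hm
  rw [hm']
  congr 1
  omega

lemma mymax_le_subset (xs ys : List Int) (hne : xs ≠ []) (hsub : ∀ v ∈ xs, v ∈ ys) :
    (mymax xs).getD 0 ≤ (mymax ys).getD 0 := by
  obtain ⟨m, hm⟩ := mymax_ne_none xs hne
  obtain ⟨hmem, _⟩ := mymax_spec xs m hm
  have hmy : m ∈ ys := hsub m hmem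
  obtain ⟨M, hM⟩ := mymax_ne_none ys (by rintro rfl; simp at hmy)
  obtain ⟨_, hallM⟩ := mymax_spec ys M hM
  rw [hm, hM]
  exact hallM m hmy

lemma mymin_ge_subset (xs ys : List Int) (hne : xs ≠ []) (hsub : ∀ v ∈ xs, v ∈ ys) :
    (mymin ys).getD 0 ≤ (mymin xs).getD 0 := by
  obtain ⟨m, hm⟩ := mymin_ne_none xs hne
  obtain ⟨hmem, _⟩ := mymin_spec xs m hm
  have hmy : m ∈ ys := hsub m hmem
  obtain ⟨M, hM⟩ := mymin_ne_none ys (by rintro rfl; simp at hmy)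
  obtain ⟨_, hallM⟩ := mymin_spec ys M hM
  rw [hm, hM]
  exact hallM m hmy

-- ---- okb ----
lemma vals_subset (nums : List Int) (l i j : Nat) (hle : l ≤ i) :
    ∀ v ∈ vals nums i j, v ∈ vals nums l j := by
  intro v hv
  obtain ⟨t, ht, rfl⟩ := List.mem_map.mp hv
  exact List.mem_map.mpr ⟨t, (pidx_mem nums l j t).mpr (by
    have := (pidx_mem nums i j t).mp ht
    exact ⟨this.1, by omega, this.2.2⟩), rfl⟩

lemma vals_subset_j (nums : List Int) (l j : Nat) :
    ∀ v ∈ vals nums l j, v ∈ vals nums l (j+1) := by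
  intro v hv
  obtain ⟨t, ht, rfl⟩ := List.mem_map.mp hv
  exact List.mem_map.mpr ⟨t, (pidx_mem nums l (j+1) t).mpr (by
    have := (pidx_mem nums l j t).mp ht
    exact ⟨by omega, this.2.1, this.2.2⟩), rfl⟩

lemma vals_ne_nil (nums : List Int) (l j : Nat) (h : pidx nums l j ≠ []) :
    vals nums l j ≠ [] := by
  simpa [vals] using h

lemma okb_mono_l (nums : List Int) (k : Int) (l i j : Nat) (h : okb nums k l j) (hle : l ≤ i) :
    okb nums k i j := by
  unfold okb at h ⊢
  by_cases hemp : pidx nums i j = []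
  · exact Or.inl hemp
  · rcases h with h | h
    · exfalso
      apply hemp
      cases hx : pidx nums i j with
      | nil => rfl
      | cons a as =>
        exfalso
        have ha : a ∈ pidx nums i j := by simp [hx]
        have := (pidx_mem nums i j a).mp ha
        have : a ∈ pidx nums l j := (pidx_mem nums l j a).mpr ⟨this.1, by omega, this.2.2⟩
        simp [h] at this
    · right
      have hvne := vals_ne_nil nums i j hemp
      have h1 := mymax_le_subset (vals nums i j) (vals nums l j) hvne (vals_subset nums l i j hle)
      have h2 := mymin_ge_subset (vals nums i j) (vals nums l j) hvne (vals_subset nums l i j hle)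
      omega

lemma not_okb_mono_j (nums : List Int) (k : Int) (l j : Nat) (h : ¬ okb nums k l j) :
    ¬ okb nums k l (j+1) := by
  unfold okb at h ⊢
  push_neg at h
  obtain ⟨hne, hdiff⟩ := h
  push_neg
  constructor
  · intro hx
    apply hne
    cases hy : pidx nums l j with
    | nil => rfl
    | cons a as =>
      exfalso
      have ha : a ∈ pidx nums l j := by simp [hy]
      have := (pidx_mem nums l j a).mp ha
      have : a ∈ pidx nums l (j+1) := (pidx_mem nums l (j+1) a).mpr ⟨by omega, this.2.1, this.2.2⟩
      simp [hx] at this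
  · have hvne := vals_ne_nil nums l j hne
    have h1 := mymax_le_subset (vals nums l j) (vals nums l (j+1)) hvne (vals_subset_j nums l j)
    have h2 := mymin_ge_subset (vals nums l j) (vals nums l (j+1)) hvne (vals_subset_j nums l j)
    omega

-- ---- monotonic queues ----
lemma keepMax_spec (nums : List Int) (w : List Nat) (i : Nat) (h : keepMax nums w i = true) :
    ∀ t ∈ w, i < t → pyGetI nums t < pyGetI nums i := by
  intro t ht hlt
  have := List.all_eq_true.mp h t ht
  simp only [decide_eq_true_eq] at this
  exact this hlt

lemma keepMax_intro (nums : List Int) (w : List Nat) (i : Nat)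
    (h : ∀ t ∈ w, i < t → pyGetI nums t < pyGetI nums i) : keepMax nums w i = true := by
  apply List.all_eq_true.mpr
  intro t ht
  simp only [decide_eq_true_eq]
  exact h t ht

lemma keepMin_spec (nums : List Int) (w : List Nat) (i : Nat) (h : keepMin nums w i = true) :
    ∀ t ∈ w, i < t → pyGetI nums i < pyGetI nums t := by
  intro t ht hlt
  have := List.all_eq_true.mp h t ht
  simp only [decide_eq_true_eq] at this
  exact this hlt

lemma keepMin_intro (nums : List Int) (w : List Nat) (i : Nat)
    (h : ∀ t ∈ w, i < t → pyGetI nums i < pyGetI nums t) : keepMin nums w i = true := by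
  apply List.all_eq_true.mpr
  intro t ht
  simp only [decide_eq_true_eq]
  exact h t ht

lemma keepMax_cons (nums : List Int) (a : Nat) (w : List Nat) (hpa : ∀ x ∈ w, a < x) :
    ∀ x ∈ w, keepMax nums (a :: w) x = keepMax nums w x := by
  intro x hx
  have hxa : ¬ (x < a) := by have := hpa x hx; omega
  simp [keepMax, List.all_cons, hxa]

lemma keepMin_cons (nums : List Int) (a : Nat) (w : List Nat) (hpa : ∀ x ∈ w, a < x) :
    ∀ x ∈ w, keepMin nums (a :: w) x = keepMin nums w x := by
  intro x hx
  have hxa : ¬ (x < a) := by have := hpa x hx; omega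
  simp [keepMin, List.all_cons, hxa]

lemma rm_head_max (nums : List Int) (w : List Nat) (hs : w.Pairwise (· < ·)) (hne : w ≠ []) :
    w.filter (keepMax nums w) ≠ [] ∧
      mymax (w.map (pyGetI nums))
        = some (pyGetI nums ((w.filter (keepMax nums w)).headD 0)) := by
  induction w with
  | nil => simp at hne
  | cons a w' ih =>
    have hpa : ∀ x ∈ w', a < x := fun x hx => (List.pairwise_cons.mp hs).1 x hx
    have hcongr : w'.filter (keepMax nums (a :: w')) = w'.filter (keepMax nums w') :=
      List.filter_congr (keepMax_cons nums a w' hpa)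
    by_cases hk : keepMax nums (a :: w') a = true
    · have hfil : (a :: w').filter (keepMax nums (a :: w')) = a :: w'.filter (keepMax nums w') := by
        rw [List.filter_cons, if_pos hk, hcongr]
      refine ⟨by simp [hfil], ?_⟩
      rw [hfil]
      simp only [List.headD_cons]
      apply mymax_eq
      · exact List.mem_map.mpr ⟨a, by simp, rfl⟩
      · intro v hv
        obtain ⟨t, ht, rfl⟩ := List.mem_map.mp hv
        rcases List.mem_cons.mp ht with rfl | ht'
        · exact le_refl _
        · exact le_of_lt (keepMax_spec nums _ a hk t (List.mem_cons_of_mem a ht') (hpa t ht'))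
    · have hwit : ∃ b ∈ a :: w', a < b ∧ pyGetI nums a ≤ pyGetI nums b := by
        have : ¬ (∀ i' ∈ a :: w', a < i' → pyGetI nums i' < pyGetI nums a) := by
          intro hc; exact hk (keepMax_intro nums _ a hc)
        push_neg at this
        obtain ⟨b, hb, h1, h2⟩ := this
        exact ⟨b, hb, h1, h2⟩
      obtain ⟨b, hb, hab, hvab⟩ := hwit
      have hbw' : b ∈ w' := by
        rcases List.mem_cons.mp hb with rfl | h' ; · omega
        · exact h'
      have hw'ne : w' ≠ [] := by rintro rfl; simp at hbw'
      obtain ⟨ihne, ihmax⟩ := ih (List.pairwise_cons.mp hs).2 hw'ne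
      have hfil : (a :: w').filter (keepMax nums (a :: w')) = w'.filter (keepMax nums w') := by
        rw [List.filter_cons, if_neg hk, hcongr]
      refine ⟨by rw [hfil]; exact ihne, ?_⟩
      rw [hfil]
      set hd := (w'.filter (keepMax nums w')).headD 0 with hhd
      obtain ⟨hmem, hall⟩ := mymax_spec _ _ ihmax
      apply mymax_eq
      · exact List.mem_cons_of_mem _ hmem
      · intro v hv
        rcases List.mem_cons.mp hv with rfl | hv'
        · exact le_trans hvab (hall _ (List.mem_map.mpr ⟨b, hbw', rfl⟩))
        · exact hall v hv'

lemma rm_head_min (nums : List Int) (w : List Nat) (hs : w.Pairwise (· < ·)) (hne : w ≠ []) :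
    w.filter (keepMin nums w) ≠ [] ∧
      mymin (w.map (pyGetI nums))
        = some (pyGetI nums ((w.filter (keepMin nums w)).headD 0)) := by
  induction w with
  | nil => simp at hne
  | cons a w' ih =>
    have hpa : ∀ x ∈ w', a < x := fun x hx => (List.pairwise_cons.mp hs).1 x hx
    have hcongr : w'.filter (keepMin nums (a :: w')) = w'.filter (keepMin nums w') :=
      List.filter_congr (keepMin_cons nums a w' hpa)
    by_cases hk : keepMin nums (a :: w') a = true
    · have hfil : (a :: w').filter (keepMin nums (a :: w')) = a :: w'.filter (keepMin nums w') := by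
        rw [List.filter_cons, if_pos hk, hcongr]
      refine ⟨by simp [hfil], ?_⟩
      rw [hfil]
      simp only [List.headD_cons]
      apply mymin_eq
      · exact List.mem_map.mpr ⟨a, by simp, rfl⟩
      · intro v hv
        obtain ⟨t, ht, rfl⟩ := List.mem_map.mp hv
        rcases List.mem_cons.mp ht with rfl | ht'
        · exact le_refl _
        · exact le_of_lt (keepMin_spec nums _ a hk t (List.mem_cons_of_mem a ht') (hpa t ht'))
    · have hwit : ∃ b ∈ a :: w', a < b ∧ pyGetI nums b ≤ pyGetI nums a := by
        have : ¬ (∀ i' ∈ a :: w', a < i' → pyGetI nums a < pyGetI nums i') := by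
          intro hc; exact hk (keepMin_intro nums _ a hc)
        push_neg at this
        obtain ⟨b, hb, h1, h2⟩ := this
        exact ⟨b, hb, h1, h2⟩
      obtain ⟨b, hb, hab, hvab⟩ := hwit
      have hbw' : b ∈ w' := by
        rcases List.mem_cons.mp hb with rfl | h' ; · omega
        · exact h'
      have hw'ne : w' ≠ [] := by rintro rfl; simp at hbw'
      obtain ⟨ihne, ihmin⟩ := ih (List.pairwise_cons.mp hs).2 hw'ne
      have hfil : (a :: w').filter (keepMin nums (a :: w')) = w'.filter (keepMin nums w') := by
        rw [List.filter_cons, if_neg hk, hcongr]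
      refine ⟨by rw [hfil]; exact ihne, ?_⟩
      rw [hfil]
      set hd := (w'.filter (keepMin nums w')).headD 0 with hhd
      obtain ⟨hmem, hall⟩ := mymin_spec _ _ ihmin
      apply mymin_eq
      · exact List.mem_cons_of_mem _ hmem
      · intro v hv
        rcases List.mem_cons.mp hv with rfl | hv'
        · exact le_trans (hall _ (List.mem_map.mpr ⟨b, hbw', rfl⟩)) hvab
        · exact hall v hv'

lemma rmax_desc (nums : List Int) (l j : Nat) :
    (rmax nums l j).Pairwise (fun a b => pyGetI nums b < pyGetI nums a) := by
  have hlt : (rmax nums l j).Pairwise (· < ·) :=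
    (pidx_sorted nums l j).sublist List.filter_sublist
  refine hlt.imp_of_mem ?_
  intro a b ha hb hab
  have hka : keepMax nums (pidx nums l j) a = true := (List.mem_filter.mp ha).2
  have hbp : b ∈ pidx nums l j := (List.mem_filter.mp hb).1
  exact keepMax_spec nums _ a hka b hbp hab

lemma rmin_asc (nums : List Int) (l j : Nat) :
    (rmin nums l j).Pairwise (fun a b => pyGetI nums a < pyGetI nums b) := by
  have hlt : (rmin nums l j).Pairwise (· < ·) :=
    (pidx_sorted nums l j).sublist List.filter_sublist
  refine hlt.imp_of_mem ?_
  intro a b ha hb hab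
  have hka : keepMin nums (pidx nums l j) a = true := (List.mem_filter.mp ha).2
  have hbp : b ∈ pidx nums l j := (List.mem_filter.mp hb).1
  exact keepMin_spec nums _ a hka b hbp hab

lemma popMaxBack_eq_filter (nums : List Int) (val : Int) (q : List Nat)
    (hs : q.Pairwise (fun a b => pyGetI nums b < pyGetI nums a)) :
    popMaxBack nums q val = q.filter (fun i => decide (val < pyGetI nums i)) := by
  induction q using List.reverseRecOn with
  | nil => simp [popMaxBack]
  | append_singleton ys y ih =>
    rw [popMaxBack]
    rw [List.filter_append]
    split
    next j heq =>
      have hj : j = y := by simpa using heq.symm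
      rw [hj, List.dropLast_concat]
      by_cases hc : pyGetI nums y ≤ val
      · rw [if_pos hc, ih (hs.sublist (List.sublist_append_left ys [y]))]
        have : ¬ (val < pyGetI nums y) := by omega
        simp [this]
      · rw [if_neg hc]
        have h1 : List.filter (fun i => decide (val < pyGetI nums i)) [y] = [y] := by
          simp; omega
        rw [h1]
        congr 1
        symm
        apply List.filter_eq_self.mpr
        intro x hx
        have hxy : pyGetI nums y < pyGetI nums x := by
          have := List.pairwise_append.mp hs
          exact this.2.2 x hx y (by simp)
        simp
        omega
    next heq => simp at heq

lemma popMinBack_eq_filter (nums : List Int) (val : Int) (q : List Nat)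
    (hs : q.Pairwise (fun a b => pyGetI nums a < pyGetI nums b)) :
    popMinBack nums q val = q.filter (fun i => decide (pyGetI nums i < val)) := by
  induction q using List.reverseRecOn with
  | nil => simp [popMinBack]
  | append_singleton ys y ih =>
    rw [popMinBack]
    rw [List.filter_append]
    split
    next j heq =>
      have hj : j = y := by simpa using heq.symm
      rw [hj, List.dropLast_concat]
      by_cases hc : val ≤ pyGetI nums y
      · rw [if_pos hc, ih (hs.sublist (List.sublist_append_left ys [y]))]
        have : ¬ (pyGetI nums y < val) := by omega
        simp [this]
      · rw [if_neg hc]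
        have h1 : List.filter (fun i => decide (pyGetI nums i < val)) [y] = [y] := by
          simp; omega
        rw [h1]
        congr 1
        symm
        apply List.filter_eq_self.mpr
        intro x hx
        have hxy : pyGetI nums x < pyGetI nums y := by
          have := List.pairwise_append.mp hs
          exact this.2.2 x hx y (by simp)
        simp
        omega
    next heq => simp at heq

lemma rmax_push (nums : List Int) (l r : Nat) (hlr : l ≤ r)
    (hp : isPrime (pyGetI nums r) = true) :
    rmax nums l (r+1)
      = (rmax nums l r).filter (fun i => decide (pyGetI nums r < pyGetI nums i)) ++ [r] := by
  have hw : pidx nums l (r+1) = pidx nums l r ++ [r] := by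
    rw [← pidx_succ]; simp [hlr, hp]
  have hmemr : ∀ x ∈ pidx nums l r, x < r := fun x hx => ((pidx_mem nums l r x).mp hx).1
  unfold rmax
  rw [hw, List.filter_append]
  have hkr : keepMax nums (pidx nums l r ++ [r]) r = true := by
    apply keepMax_intro
    intro t ht hlt
    exfalso
    rcases List.mem_append.mp ht with ht | ht
    · have := hmemr t ht; omega
    · simp at ht; omega
  have h2 : List.filter (keepMax nums (pidx nums l r ++ [r])) [r] = [r] := by
    simp [hkr]
  rw [h2]
  congr 1
  have hsplit : ∀ x ∈ pidx nums l r,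
      keepMax nums (pidx nums l r ++ [r]) x
        = (keepMax nums (pidx nums l r) x && decide (pyGetI nums r < pyGetI nums x)) := by
    intro x hx
    have hxr : x < r := hmemr x hx
    rw [Bool.eq_iff_iff]
    constructor
    · intro h
      have hsp := keepMax_spec nums _ x h
      rw [Bool.and_eq_true]
      constructor
      · apply keepMax_intro
        intro t ht hlt
        exact hsp t (List.mem_append_left _ ht) hlt
      · simp only [decide_eq_true_eq]
        exact hsp r (List.mem_append_right _ (by simp)) hxr
    · intro h
      rw [Bool.and_eq_true] at h
      obtain ⟨h1, h2⟩ := h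
      apply keepMax_intro
      intro t ht hlt
      rcases List.mem_append.mp ht with ht | ht
      · exact keepMax_spec nums _ x h1 t ht hlt
      · simp at ht
        subst ht
        simpa using h2
  rw [List.filter_congr hsplit]
  rw [List.filter_filter]
  apply List.filter_congr
  intro x _
  rw [Bool.and_comm]

lemma rmin_push (nums : List Int) (l r : Nat) (hlr : l ≤ r)
    (hp : isPrime (pyGetI nums r) = true) :
    rmin nums l (r+1)
      = (rmin nums l r).filter (fun i => decide (pyGetI nums i < pyGetI nums r)) ++ [r] := by
  have hw : pidx nums l (r+1) = pidx nums l r ++ [r] := by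
    rw [← pidx_succ]; simp [hlr, hp]
  have hmemr : ∀ x ∈ pidx nums l r, x < r := fun x hx => ((pidx_mem nums l r x).mp hx).1
  unfold rmin
  rw [hw, List.filter_append]
  have hkr : keepMin nums (pidx nums l r ++ [r]) r = true := by
    apply keepMin_intro
    intro t ht hlt
    exfalso
    rcases List.mem_append.mp ht with ht | ht
    · have := hmemr t ht; omega
    · simp at ht; omega
  have h2 : List.filter (keepMin nums (pidx nums l r ++ [r])) [r] = [r] := by
    simp [hkr]
  rw [h2]
  congr 1
  have hsplit : ∀ x ∈ pidx nums l r,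
      keepMin nums (pidx nums l r ++ [r]) x
        = (keepMin nums (pidx nums l r) x && decide (pyGetI nums x < pyGetI nums r)) := by
    intro x hx
    have hxr : x < r := hmemr x hx
    rw [Bool.eq_iff_iff]
    constructor
    · intro h
      have hsp := keepMin_spec nums _ x h
      rw [Bool.and_eq_true]
      constructor
      · apply keepMin_intro
        intro t ht hlt
        exact hsp t (List.mem_append_left _ ht) hlt
      · simp only [decide_eq_true_eq]
        exact hsp r (List.mem_append_right _ (by simp)) hxr
    · intro h
      rw [Bool.and_eq_true] at h
      obtain ⟨h1, h2⟩ := h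
      apply keepMin_intro
      intro t ht hlt
      rcases List.mem_append.mp ht with ht | ht
      · exact keepMin_spec nums _ x h1 t ht hlt
      · simp at ht
        subst ht
        simpa using h2
  rw [List.filter_congr hsplit]
  rw [List.filter_filter]
  apply List.filter_congr
  intro x _
  rw [Bool.and_comm]

lemma rmax_same (nums : List Int) (l r : Nat) (h : pidx nums l (r+1) = pidx nums l r) :
    rmax nums l (r+1) = rmax nums l r := by
  simp [rmax, h]

lemma rmin_same (nums : List Int) (l r : Nat) (h : pidx nums l (r+1) = pidx nums l r) :
    rmin nums l (r+1) = rmin nums l r := by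
  simp [rmin, h]

lemma rmax_succ_left (nums : List Int) (l j : Nat) :
    rmax nums (l+1) j = (rmax nums l j).filter (fun t => decide (t ≠ l)) := by
  unfold rmax
  rw [pidx_succ_left]
  have hcongr : ∀ x ∈ (pidx nums l j).filter (fun t => decide (t ≠ l)),
      keepMax nums ((pidx nums l j).filter (fun t => decide (t ≠ l))) x
        = keepMax nums (pidx nums l j) x := by
    intro x hx
    have hxl : l ≤ x ∧ x ≠ l := by
      have h1 := (pidx_mem nums l j x).mp (List.mem_filter.mp hx).1
      have h2 := (List.mem_filter.mp hx).2
      simp at h2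
      exact ⟨h1.2.1, h2⟩
    rw [Bool.eq_iff_iff]
    constructor
    · intro h
      apply keepMax_intro
      intro t ht hlt
      apply keepMax_spec nums _ x h t _ hlt
      apply List.mem_filter.mpr
      refine ⟨ht, by simp; omega⟩
    · intro h
      apply keepMax_intro
      intro t ht hlt
      exact keepMax_spec nums _ x h t (List.mem_filter.mp ht).1 hlt
  rw [List.filter_congr hcongr]
  rw [List.filter_filter, List.filter_filter]
  apply List.filter_congr
  intro x _
  rw [Bool.and_comm]

lemma rmin_succ_left (nums : List Int) (l j : Nat) :
    rmin nums (l+1) j = (rmin nums l j).filter (fun t => decide (t ≠ l)) := by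
  unfold rmin
  rw [pidx_succ_left]
  have hcongr : ∀ x ∈ (pidx nums l j).filter (fun t => decide (t ≠ l)),
      keepMin nums ((pidx nums l j).filter (fun t => decide (t ≠ l))) x
        = keepMin nums (pidx nums l j) x := by
    intro x hx
    have hxl : l ≤ x ∧ x ≠ l := by
      have h1 := (pidx_mem nums l j x).mp (List.mem_filter.mp hx).1
      have h2 := (List.mem_filter.mp hx).2
      simp at h2
      exact ⟨h1.2.1, h2⟩
    rw [Bool.eq_iff_iff]
    constructor
    · intro h
      apply keepMin_intro
      intro t ht hlt
      apply keepMin_spec nums _ x h t _ hlt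
      apply List.mem_filter.mpr
      refine ⟨ht, by simp; omega⟩
    · intro h
      apply keepMin_intro
      intro t ht hlt
      exact keepMin_spec nums _ x h t (List.mem_filter.mp ht).1 hlt
  rw [List.filter_congr hcongr]
  rw [List.filter_filter, List.filter_filter]
  apply List.filter_congr
  intro x _
  rw [Bool.and_comm]

-- ---- the shrink loop ----
lemma pidx_empty (nums : List Int) (l j : Nat) (h : j ≤ l) : pidx nums l j = [] := by
  rw [List.eq_nil_iff_forall_not_mem]
  intro t ht
  have := (pidx_mem nums l j t).mp ht
  omega

lemma headD_eq_iff (xs : List Nat) (l : Nat) (h : xs ≠ []) :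
    xs.headD 0 = l ↔ xs.head? = some l := by
  cases xs with
  | nil => simp at h
  | cons a as => simp

lemma rmax_sorted (nums : List Int) (l j : Nat) : (rmax nums l j).Pairwise (· < ·) :=
  (pidx_sorted nums l j).sublist List.filter_sublist

lemma rmin_sorted (nums : List Int) (l j : Nat) : (rmin nums l j).Pairwise (· < ·) :=
  (pidx_sorted nums l j).sublist List.filter_sublist

lemma rmax_ge (nums : List Int) (l j : Nat) : ∀ t ∈ rmax nums l j, l ≤ t :=
  fun t ht => ((pidx_mem nums l j t).mp (List.mem_filter.mp ht).1).2.1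

lemma rmin_ge (nums : List Int) (l j : Nat) : ∀ t ∈ rmin nums l j, l ≤ t :=
  fun t ht => ((pidx_mem nums l j t).mp (List.mem_filter.mp ht).1).2.1

lemma pidx_ge (nums : List Int) (l j : Nat) : ∀ t ∈ pidx nums l j, l ≤ t :=
  fun t ht => ((pidx_mem nums l j t).mp ht).2.1

-- the head of the max-queue carries the window's prime maximum (and dually)
lemma rmax_head (nums : List Int) (l j : Nat) (h : pidx nums l j ≠ []) :
    rmax nums l j ≠ [] ∧
      mymax (vals nums l j) = some (pyGetI nums ((rmax nums l j).headD 0)) :=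
  rm_head_max nums (pidx nums l j) (pidx_sorted nums l j) h

lemma rmin_head (nums : List Int) (l j : Nat) (h : pidx nums l j ≠ []) :
    rmin nums l j ≠ [] ∧
      mymin (vals nums l j) = some (pyGetI nums ((rmin nums l j).headD 0)) :=
  rm_head_min nums (pidx nums l j) (pidx_sorted nums l j) h

-- one popleft step of each queue moves the window's left edge from l to l+1
lemma queue_popleft (xs : List Nat) (l : Nat) (hs : xs.Pairwise (· < ·))
    (hge : ∀ t ∈ xs, l ≤ t) :
    (if xs ≠ [] ∧ xs.headD 0 = l then xs.tail else xs)
      = xs.filter (fun t => decide (t ≠ l)) := by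
  rw [filter_ne_head l xs hs hge]
  by_cases hne : xs = []
  · subst hne; simp
  · simp only [headD_eq_iff xs l hne]
    by_cases hh : xs.head? = some l
    · rw [if_pos ⟨hne, hh⟩, if_pos hh]
    · rw [if_neg (by tauto), if_neg hh]

lemma shrink_spec (nums : List Int) (k : Int) (j : Nat) :
    ∀ (fuel l : Nat), l ≤ j → j ≤ fuel + l → (∀ l' < l, ¬ okb nums k l' j) →
    ∃ lf, l ≤ lf ∧ lf ≤ j ∧
      shrinkLoop nums k fuel (rmax nums l j) (rmin nums l j) (pidx nums l j) l
        = (rmax nums lf j, rmin nums lf j, pidx nums lf j, lf) ∧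
      okb nums k lf j ∧ ∀ l' < lf, ¬ okb nums k l' j := by
  intro fuel
  induction fuel with
  | zero =>
    intro l h1 h2 h3
    have hlj : l = j := by omega
    refine ⟨l, le_refl l, by omega, rfl, ?_, h3⟩
    exact Or.inl (pidx_empty nums l j (by omega))
  | succ f ih =>
    intro l h1 h2 h3
    rw [shrinkLoop]
    by_cases hC : pidx nums l j ≠ [] ∧
        pyGetI nums ((rmax nums l j).headD 0) - pyGetI nums ((rmin nums l j).headD 0) > k
    · obtain ⟨hPe, hgt⟩ := hC
      have hlj : l < j := by
        cases hx : pidx nums l j with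
        | nil => exact absurd hx hPe
        | cons a as =>
          have : a ∈ pidx nums l j := by simp [hx]
          have := (pidx_mem nums l j a).mp this
          omega
      have hnotok : ¬ okb nums k l j := by
        unfold okb
        push_neg
        refine ⟨hPe, ?_⟩
        rw [(rmax_head nums l j hPe).2, (rmin_head nums l j hPe).2]
        simp only [Option.getD_some]
        omega
      rw [if_pos ⟨hPe, hgt⟩]
      have hup1 : (if rmax nums l j ≠ [] ∧ (rmax nums l j).headD 0 = l then (rmax nums l j).tail
          else rmax nums l j) = rmax nums (l+1) j := by
        rw [queue_popleft _ l (rmax_sorted nums l j) (rmax_ge nums l j), ← rmax_succ_left]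
      have hup2 : (if rmin nums l j ≠ [] ∧ (rmin nums l j).headD 0 = l then (rmin nums l j).tail
          else rmin nums l j) = rmin nums (l+1) j := by
        rw [queue_popleft _ l (rmin_sorted nums l j) (rmin_ge nums l j), ← rmin_succ_left]
      have hup3 : (if pidx nums l j ≠ [] ∧ (pidx nums l j).headD 0 = l then (pidx nums l j).tail
          else pidx nums l j) = pidx nums (l+1) j := by
        rw [queue_popleft _ l (pidx_sorted nums l j) (pidx_ge nums l j), ← pidx_succ_left]
      rw [hup1, hup2, hup3]
      have h3' : ∀ l' < l + 1, ¬ okb nums k l' j := by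
        intro l' hl'
        rcases Nat.lt_succ_iff_lt_or_eq.mp hl' with h | h
        · exact h3 l' h
        · subst h; exact hnotok
      obtain ⟨lf, hA, hB, hC', hD, hE⟩ := ih (l+1) (by omega) (by omega) h3'
      exact ⟨lf, by omega, hB, hC', hD, hE⟩
    · rw [if_neg hC]
      refine ⟨l, le_refl l, h1, rfl, ?_, h3⟩
      by_cases hPe : pidx nums l j = []
      · exact Or.inl hPe
      · right
        rw [not_and_or] at hC
        rcases hC with hC | hC
        · exact absurd hPe (by simpa using hC)
        · rw [(rmax_head nums l j hPe).2, (rmin_head nums l j hPe).2]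
          simp only [Option.getD_some]
          omega

-- ---- the per-step count ----
lemma countP_range_sum (n : Nat) (p : Nat → Prop) [DecidablePred p] :
    (List.range n).countP (fun i => decide (p i)) = ∑ i ∈ Finset.range n, if p i then 1 else 0 := by
  induction n with
  | zero => simp
  | succ n ih =>
    rw [List.range_succ, List.countP_append, Finset.sum_range_succ, ih]
    by_cases h : p n <;> simp [h]

lemma count_interval (n l s : Nat) (hls : l ≤ s) (hsn : s < n) :
    (List.range n).countP (fun i => decide (l ≤ i ∧ i ≤ s)) = s + 1 - l := by
  have aux : ∀ m, (List.range m).countP (fun i => decide (l ≤ i ∧ i ≤ s)) = min m (s+1) - l := by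
    intro m
    induction m with
    | zero => simp
    | succ m ih =>
      rw [List.range_succ, List.countP_append, ih]
      by_cases h : l ≤ m ∧ m ≤ s
      · simp only [List.countP_cons, List.countP_nil]
        simp [h]
        omega
      · simp only [List.countP_cons, List.countP_nil]
        simp [h]
        omega
  rw [aux]
  omega

lemma two_le_filter (P : List Nat) (hs : P.Pairwise (· < ·)) (i : Nat) :
    2 ≤ (P.filter (fun t => decide (i ≤ t))).length ↔
      2 ≤ P.length ∧ i ≤ P.getD (P.length - 2) 0 := by
  induction P with
  | nil => simp
  | cons a Q ih =>
    have hpa : ∀ x ∈ Q, a < x := fun x hx => (List.pairwise_cons.mp hs).1 x hx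
    by_cases hia : i ≤ a
    · have hfil : (a :: Q).filter (fun t => decide (i ≤ t)) = a :: Q := by
        apply List.filter_eq_self.mpr
        intro x hx
        simp only [decide_eq_true_eq]
        rcases List.mem_cons.mp hx with rfl | hx'
        · exact hia
        · have := hpa x hx'; omega
      rw [hfil]
      constructor
      · intro h2
        refine ⟨h2, ?_⟩
        have hlen : (a :: Q).length - 2 < (a :: Q).length := by simp
        rw [List.getD_eq_getElem _ 0 hlen]
        have hmem := List.getElem_mem hlen
        rcases List.mem_cons.mp hmem with hm | hm
        · omega
        · have := hpa _ hm; omega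
      · exact fun h => h.1
    · have hfil : (a :: Q).filter (fun t => decide (i ≤ t)) = Q.filter (fun t => decide (i ≤ t)) := by
        rw [List.filter_cons]
        simp [hia]
      rw [hfil, ih (List.pairwise_cons.mp hs).2]
      cases Q with
      | nil => simp
      | cons b Q' =>
        cases Q' with
        | nil =>
          simp only [List.length_cons, List.length_nil]
          constructor
          · rintro ⟨h1, _⟩; omega
          · rintro ⟨_, h2⟩
            exfalso
            simp at h2
            omega
        | cons c Q'' =>
          constructor
          · rintro ⟨h1, h2⟩
            refine ⟨by simp, ?_⟩
            have : (a :: b :: c :: Q'').length - 2 = ((b :: c :: Q'').length - 2) + 1 := by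
              simp
            rw [this, List.getD_cons_succ]
            exact h2
          · rintro ⟨h1, h2⟩
            refine ⟨by simp, ?_⟩
            have : (a :: b :: c :: Q'').length - 2 = ((b :: c :: Q'').length - 2) + 1 := by
              simp
            rw [this, List.getD_cons_succ] at h2
            exact h2

lemma res_step (nums : List Int) (k : Int) (r l : Nat) (hrn : r < nums.length)
    (hlr : l ≤ r + 1) (hok : okb nums k l (r+1)) (hmin : ∀ l' < l, ¬ okb nums k l' (r+1)) :
    (if 2 ≤ (pidx nums l (r+1)).length
      then (((pidx nums l (r+1)).getD ((pidx nums l (r+1)).length - 2) 0 : Int) - (l : Int) + 1)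
      else 0) = (gcount nums k r : Int) := by
  by_cases hP : 2 ≤ (pidx nums l (r+1)).length
  · rw [if_pos hP]
    set P := pidx nums l (r+1) with hPdef
    set s := P.getD (P.length - 2) 0 with hsdef
    have hlen : P.length - 2 < P.length := by omega
    have hsP : s ∈ P := by
      rw [hsdef, List.getD_eq_getElem _ 0 hlen]
      exact List.getElem_mem hlen
    have hsprop := (pidx_mem nums l (r+1) s).mp hsP
    have key : ∀ i, goodb nums k i r ↔ (l ≤ i ∧ i ≤ s) := by
      intro i
      constructor
      · rintro ⟨hg1, hg2⟩
        have hli : l ≤ i := by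
          by_contra hcon
          have hno := hmin i (by omega)
          unfold okb at hno
          push_neg at hno
          obtain ⟨hne, hgt⟩ := hno
          omega
        refine ⟨hli, ?_⟩
        rw [pidx_shift nums l i (r+1) hli] at hg1
        exact ((two_le_filter P (pidx_sorted nums l (r+1)) i).mp hg1).2
      · rintro ⟨hli, his⟩
        have hg1 : 2 ≤ (pidx nums i (r+1)).length := by
          rw [pidx_shift nums l i (r+1) hli]
          exact (two_le_filter P (pidx_sorted nums l (r+1)) i).mpr ⟨hP, his⟩
        refine ⟨hg1, ?_⟩
        have hoki := okb_mono_l nums k l i (r+1) hok hli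
        rcases hoki with h | h
        · rw [h] at hg1; simp at hg1
        · exact h
    have hcount : gcount nums k r = (List.range nums.length).countP
        (fun i => decide (l ≤ i ∧ i ≤ s)) := by
      unfold gcount
      apply List.countP_congr
      intro x _
      simp only [decide_eq_true_eq]
      exact key x
    rw [hcount, count_interval nums.length l s hsprop.2.1 (by omega)]
    have h1 : l ≤ s := hsprop.2.1
    push_cast [Nat.cast_sub (by omega : l ≤ s + 1)]
    ring
  · rw [if_neg hP]
    have hzero : ∀ i, ¬ goodb nums k i r := by
      intro i hg
      obtain ⟨hg1, hg2⟩ := hg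
      by_cases hli : l ≤ i
      · rw [pidx_shift nums l i (r+1) hli] at hg1
        have := List.length_filter_le (fun t => decide (i ≤ t)) (pidx nums l (r+1))
        omega
      · have hno := hmin i (by omega)
        unfold okb at hno
        push_neg at hno
        omega
    have : gcount nums k r = 0 := by
      unfold gcount
      apply List.countP_eq_zero.mpr
      intro x _
      simpa using hzero x
    rw [this]
    simp

-- ---- A: the main loop invariant ----
lemma A_inv (nums : List Int) (k : Int) :
    ∀ r, r ≤ nums.length →
    ∃ l, ((List.range r).foldl (stepA nums k) ([], [], [], 0, 0))
        = (rmax nums l r, rmin nums l r, pidx nums l r,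
           ∑ j ∈ Finset.range r, (gcount nums k j : Int), l)
      ∧ l ≤ r ∧ okb nums k l r ∧ ∀ l' < l, ¬ okb nums k l' r := by
  intro r
  induction r with
  | zero =>
    intro _
    refine ⟨0, ?_, le_refl 0, Or.inl (pidx_empty nums 0 0 (le_refl 0)), by omega⟩
    have h0 : pidx nums 0 0 = [] := pidx_empty nums 0 0 (le_refl 0)
    simp [rmax, rmin, h0]
  | succ r ihr =>
    intro hrn
    obtain ⟨l, hst, hlr, hok, hmin⟩ := ihr (by omega)
    rw [List.range_succ, List.foldl_append, hst, List.foldl_cons, List.foldl_nil]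
    have hmin' : ∀ l' < l, ¬ okb nums k l' (r+1) :=
      fun l' h => not_okb_mono_j nums k l' r (hmin l' h)
    have hMQ : (if isPrime (pyGetI nums r) then
          popMaxBack nums (rmax nums l r) (pyGetI nums r) ++ [r] else rmax nums l r)
        = rmax nums l (r+1) := by
      by_cases hp : isPrime (pyGetI nums r) = true
      · rw [if_pos hp, popMaxBack_eq_filter nums (pyGetI nums r) _ (rmax_desc nums l r),
          ← rmax_push nums l r hlr hp]
      · have hp' : isPrime (pyGetI nums r) = false := by simpa using hp
        rw [hp']
        simp only [Bool.false_eq_true, if_false]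
        apply (rmax_same nums l r ?_).symm
        rw [← pidx_succ]
        simp [hp']
    have hNQ : (if isPrime (pyGetI nums r) then
          popMinBack nums (rmin nums l r) (pyGetI nums r) ++ [r] else rmin nums l r)
        = rmin nums l (r+1) := by
      by_cases hp : isPrime (pyGetI nums r) = true
      · rw [if_pos hp, popMinBack_eq_filter nums (pyGetI nums r) _ (rmin_asc nums l r),
          ← rmin_push nums l r hlr hp]
      · have hp' : isPrime (pyGetI nums r) = false := by simpa using hp
        rw [hp']
        simp only [Bool.false_eq_true, if_false]
        apply (rmin_same nums l r ?_).symm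
        rw [← pidx_succ]
        simp [hp']
    have hPQ : (if isPrime (pyGetI nums r) then pidx nums l r ++ [r] else pidx nums l r)
        = pidx nums l (r+1) := by
      by_cases hp : isPrime (pyGetI nums r) = true
      · rw [if_pos hp, ← pidx_succ]
        simp [hlr, hp]
      · have hp' : isPrime (pyGetI nums r) = false := by simpa using hp
        rw [hp']
        simp only [Bool.false_eq_true, if_false]
        rw [← pidx_succ]
        simp [hp']
    simp only [stepA]
    rw [hMQ, hNQ, hPQ]
    obtain ⟨lf, hlf1, hlf2, hEQ, hok', hmin''⟩ :=
      shrink_spec nums k (r+1) (nums.length + 1) l (by omega) (by omega) hmin'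
    rw [hEQ]
    refine ⟨lf, ?_, hlf2, hok', hmin''⟩
    simp only []
    have hres : (if 2 ≤ (pidx nums lf (r+1)).length
        then (∑ j ∈ Finset.range r, (gcount nums k j : Int))
          + (((pidx nums lf (r+1)).getD ((pidx nums lf (r+1)).length - 2) 0 : Int) - (lf : Int) + 1)
        else (∑ j ∈ Finset.range r, (gcount nums k j : Int)))
        = ∑ j ∈ Finset.range (r+1), (gcount nums k j : Int) := by
      rw [Finset.sum_range_succ, ← res_step nums k r lf (by omega) hlf2 hok' hmin'']
      by_cases hc : 2 ≤ (pidx nums lf (r+1)).length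
      · rw [if_pos hc, if_pos hc]
      · rw [if_neg hc, if_neg hc]
        ring
    rw [hres]

-- ---- B: the inner loop invariant ----
lemma B_inner (nums : List Int) (k : Int) (i : Nat) (hin : i ≤ nums.length) :
    ∀ m, i + m ≤ nums.length →
    ((nums.drop i).take m).foldl (stepB k) (0, none, none, 0)
      = (((pidx nums i (i+m)).length : Int), mymin (vals nums i (i+m)), mymax (vals nums i (i+m)),
         ((List.range (i+m)).countP (fun j => decide (i ≤ j ∧ goodb nums k i j)) : Int)) := by
  intro m
  induction m with
  | zero =>
    intro _
    have hp0 : pidx nums i i = [] := pidx_empty nums i i (le_refl i)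
    have hv0 : vals nums i i = [] := by rw [vals, hp0]; rfl
    have hc0 : (List.range i).countP (fun j => decide (i ≤ j ∧ goodb nums k i j)) = 0 := by
      apply List.countP_eq_zero.mpr
      intro x hx
      simp only [List.mem_range] at hx
      simp only [decide_eq_true_eq, not_and]
      omega
    simp only [Nat.add_zero, List.take_zero, List.foldl_nil, hp0, hv0, hc0]
    simp [mymin, mymax]
  | succ m ih =>
    intro hmn
    have hmn' : i + m ≤ nums.length := by omega
    have hx1 : i + (m+1) = (i+m) + 1 := rfl
    have hget : pyGetI nums (i+m) = nums[i+m]'(by omega) := by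
      rw [pyGetI, List.getD_eq_getElem]
    have htake : (nums.drop i).take (m+1) = (nums.drop i).take m ++ [pyGetI nums (i+m)] := by
      rw [List.take_succ]
      congr
      rw [List.getElem?_drop, List.getElem?_eq_getElem (by omega : i + m < nums.length)]
      simp [hget]
    rw [htake, List.foldl_append, ih hmn', List.foldl_cons, List.foldl_nil]
    have hcnt_step : (List.range ((i+m)+1)).countP (fun j => decide (i ≤ j ∧ goodb nums k i j))
        = (List.range (i+m)).countP (fun j => decide (i ≤ j ∧ goodb nums k i j))
          + (if goodb nums k i (i+m) then 1 else 0) := by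
      rw [List.range_succ, List.countP_append]
      congr 1
      by_cases hg : goodb nums k i (i+m)
      · rw [if_pos hg]
        simp only [List.countP_cons, List.countP_nil]
        have hxp : (decide (i ≤ i + m ∧ goodb nums k i (i+m))) = true := by
          simp only [decide_eq_true_eq]
          exact ⟨by omega, hg⟩
        rw [hxp]
        simp
      · rw [if_neg hg]
        apply List.countP_eq_zero.mpr
        intro x hx
        simp only [List.mem_singleton] at hx
        subst hx
        simp only [decide_eq_true_eq]
        exact fun hcc => hg hcc.2
    by_cases hp : isPrime (pyGetI nums (i+m)) = true
    · have hpidx : pidx nums i ((i+m)+1) = pidx nums i (i+m) ++ [i+m] := by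
        rw [← pidx_succ]
        simp [hp]
      have hvals : vals nums i ((i+m)+1) = vals nums i (i+m) ++ [pyGetI nums (i+m)] := by
        rw [vals, vals, hpidx, List.map_append]
        rfl
      have hmn2 : mymin (vals nums i ((i+m)+1)) = omin (mymin (vals nums i (i+m))) (pyGetI nums (i+m)) := by
        rw [hvals, mymin_append]
      have hmx2 : mymax (vals nums i ((i+m)+1)) = omax (mymax (vals nums i (i+m))) (pyGetI nums (i+m)) := by
        rw [hvals, mymax_append]
      simp only [stepB, hp, if_pos, hx1, hcnt_step, hpidx, hmn2, hmx2]
      refine congrArg₂ Prod.mk ?_ (congrArg₂ Prod.mk rfl (congrArg₂ Prod.mk rfl ?_))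
      · simp only [List.length_append, List.length_singleton]
        push_cast
        ring
      · -- the res component
        have homin : ∀ (o : Option Int) (v : Int),
            (some (match o with | none => v | some m => if v < m then v else m) : Option Int)
              = omin o v := fun _ _ => rfl
        have homax : ∀ (o : Option Int) (v : Int),
            (some (match o with | none => v | some m => if m < v then v else m) : Option Int)
              = omax o v := fun _ _ => rfl
        rw [homin, homax]
        have hcond : ((2:Int) ≤ ((pidx nums i (i+m)).length : Int) + 1 ∧
            (omax (mymax (vals nums i (i+m))) (pyGetI nums (i+m))).getD 0
              - (omin (mymin (vals nums i (i+m))) (pyGetI nums (i+m))).getD 0 ≤ k)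
            ↔ goodb nums k i (i+m) := by
          unfold goodb
          rw [← hmn2, ← hmx2, hpidx]
          constructor
          · rintro ⟨h1, h2⟩
            refine ⟨by simp; omega, h2⟩
          · rintro ⟨h1, h2⟩
            refine ⟨by simp at h1; omega, h2⟩
        by_cases hg : goodb nums k i (i+m)
        · rw [if_pos (hcond.mpr hg), if_pos hg]
          push_cast
          ring
        · rw [if_neg (fun hc => hg (hcond.mp hc)), if_neg hg]
          push_cast
          ring
    · have hp' : isPrime (pyGetI nums (i+m)) = false := by simpa using hp
      have hpidx : pidx nums i ((i+m)+1) = pidx nums i (i+m) := by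
        rw [← pidx_succ]
        simp [hp']
      have hvals : vals nums i ((i+m)+1) = vals nums i (i+m) := by rw [vals, vals, hpidx]
      simp only [stepB, hp', Bool.false_eq_true, if_false, hx1, hcnt_step, hpidx, hvals]
      refine congrArg₂ Prod.mk rfl (congrArg₂ Prod.mk rfl (congrArg₂ Prod.mk rfl ?_))
      have hcond : ((2:Int) ≤ ((pidx nums i (i+m)).length : Int) ∧
          (mymax (vals nums i (i+m))).getD 0 - (mymin (vals nums i (i+m))).getD 0 ≤ k)
          ↔ goodb nums k i (i+m) := by
        unfold goodb
        rw [hpidx, hvals]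
        constructor
        · rintro ⟨h1, h2⟩; exact ⟨by exact_mod_cast h1, h2⟩
        · rintro ⟨h1, h2⟩; exact ⟨by exact_mod_cast h1, h2⟩
      by_cases hg : goodb nums k i (i+m)
      · rw [if_pos (hcond.mpr hg), if_pos hg]
        push_cast
        ring
      · rw [if_neg (fun hc => hg (hcond.mp hc)), if_neg hg]
        push_cast
        ring

lemma good_le (nums : List Int) (k : Int) (i j : Nat) (h : goodb nums k i j) : i ≤ j := by
  obtain ⟨h1, _⟩ := h
  cases hx : pidx nums i (j+1) with
  | nil => rw [hx] at h1; simp at h1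
  | cons a as =>
    have : a ∈ pidx nums i (j+1) := by simp [hx]
    have := (pidx_mem nums i (j+1) a).mp this
    omega

lemma A_total (nums : List Int) (k : Int) :
    primeSubarray nums k = ∑ j ∈ Finset.range nums.length, (gcount nums k j : Int) := by
  obtain ⟨l, hst, _, _, _⟩ := A_inv nums k nums.length (le_refl _)
  unfold primeSubarray
  rw [hst]

lemma B_total (nums : List Int) (k : Int) :
    primeSubarray_alt nums k = ∑ i ∈ Finset.range nums.length,
      (((List.range nums.length).countP (fun j => decide (i ≤ j ∧ goodb nums k i j)) : Nat) : Int) := by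
  have hsum : ∀ (g : Nat → Int) (n : Nat),
      ((List.range n).map g).sum = ∑ i ∈ Finset.range n, g i := by
    intro g n
    induction n with
    | zero => simp
    | succ n ih =>
      rw [List.range_succ, List.map_append, List.sum_append, Finset.sum_range_succ, ih]
      simp
  unfold primeSubarray_alt
  rw [PySem.List.foldl_add, zero_add, hsum]
  apply Finset.sum_congr rfl
  intro i hi
  have hilt : i < nums.length := Finset.mem_range.mp hi
  have hdrop : nums.drop i = (nums.drop i).take (nums.length - i) := by
    rw [List.take_of_length_le (by simp)]
  rw [hdrop]
  have hB := B_inner nums k i (by omega) (nums.length - i) (by omega)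
  have hn : i + (nums.length - i) = nums.length := by omega
  rw [hn] at hB
  rw [hB]

-- ===== VERDICT (by name: the statement is the Claim_ definition above) =====
theorem primeSubarray_spec : Claim_equal_primeSubarray := by
  intro nums k _
  unfold Spec_primeSubarray
  rw [A_total, B_total]
  have base1 : ∀ j, (gcount nums k j : Int)
      = ∑ i ∈ Finset.range nums.length, (if goodb nums k i j then (1:Int) else 0) := by
    intro j
    rw [gcount, countP_range_sum]
    push_cast
    apply Finset.sum_congr rfl
    intro i _
    by_cases h : goodb nums k i j <;> simp [h]
  have base2 : ∀ i, (((List.range nums.length).countP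
        (fun j => decide (i ≤ j ∧ goodb nums k i j)) : Nat) : Int)
      = ∑ j ∈ Finset.range nums.length, (if goodb nums k i j then (1:Int) else 0) := by
    intro i
    rw [countP_range_sum]
    push_cast
    apply Finset.sum_congr rfl
    intro j _
    by_cases h : goodb nums k i j
    · have := good_le nums k i j h
      simp [h, this]
    · simp [h]
  simp_rw [base1, base2]
  exact Finset.sum_comm
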